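-- pv_equiv track=rewrite | github.com/crs4/pydoop | pydoop/hadut.py | _pop_generic_args
-- ===== SOURCE A (Python) =====
-- GENERIC_ARGS = frozenset([
--     "-conf", "-D", "-fs", "-jt", "-files", "-libjars", "-archives"
-- ])
--
-- def _pop_generic_args(args):
--     generic_args = []
--     i = len(args) - 1
--     while i >= 0:
--         if args[i] in GENERIC_ARGS:
--             try:
--                 args[i + 1]
--             except IndexError:
--                 raise ValueError("option %s has no value" % args[i])
--             generic_args.extend(args[i: i + 2])
--             del args[i: i + 2]
--         i -= 1
--     return generic_args
-- ===== SOURCE B (Python) =====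
-- GENERIC_ARGS = frozenset([
--     "-conf", "-D", "-fs", "-jt", "-files", "-libjars", "-archives"
-- ])
--
-- def _pop_generic_args(args):
--     # One right-to-left pass with an explicit stack instead of index walking
--     # with slice deletions. Same return value and same final in-place mutation
--     # of args on success; same ValueError where A raises.
--     generic_args = []
--     stack = []
--     for a in reversed(args):
--         if a in GENERIC_ARGS:
--             if not stack:
--                 raise ValueError("option %s has no value" % a)
--             generic_args.extend([a, stack.pop()])
--         else:
--             stack.append(a)
--     args[:] = reversed(stack)
--     return generic_args
-- ===== Notes on version B (the rewrite author's own statement) =====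
-- stated objective: simpler
-- what changed: Replaces the index-walking while loop with quadratic slice deletions by a single right-to-left pass keeping surviving arguments on an explicit stack; a generic option pops the stack top as its value.
import Mathlib
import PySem

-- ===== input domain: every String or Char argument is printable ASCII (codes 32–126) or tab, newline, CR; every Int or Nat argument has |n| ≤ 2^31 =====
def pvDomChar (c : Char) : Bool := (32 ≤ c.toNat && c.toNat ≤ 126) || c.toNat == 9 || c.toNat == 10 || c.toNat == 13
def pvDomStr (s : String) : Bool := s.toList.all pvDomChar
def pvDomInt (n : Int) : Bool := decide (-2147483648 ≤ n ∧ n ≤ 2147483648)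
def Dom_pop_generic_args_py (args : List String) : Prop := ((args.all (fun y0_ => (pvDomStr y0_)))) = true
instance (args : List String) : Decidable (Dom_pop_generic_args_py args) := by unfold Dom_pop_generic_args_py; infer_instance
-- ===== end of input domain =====

-- B replaces A's index-walking loop with in-place slice deletions by a single
-- right-to-left pass over an explicit stack (simpler). Equivalence is
-- about the RETURN value; Python A also mutates args in place and Python B
-- performs the identical mutation on the non-raising inputs Pre_ admits.

-- GENERIC_ARGS (frozenset; membership test only, ported as list membership)
def pvGenericArgs : List String :=
  ["-conf", "-D", "-fs", "-jt", "-files", "-libjars", "-archives"]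

-- ===== PORT A =====
-- A's while loop: i runs len(args)-1 .. 0; state = (current mutated list, generic_args).
-- Counter n = i + 1. `none` = the ValueError path (excluded by Pre_).
-- args[i:i+2] and del args[i:i+2] are ported as take/drop (exact for 0 ≤ i).
def pvLoopA : Nat → List String → List String → Option (List String)
  | 0, _, acc => some acc
  | n + 1, cur, acc =>
    match PySem.List.pyGet? cur (n : Int) with
    | none => pvLoopA n cur acc          -- unreachable: i < len(cur) throughout
    | some x =>
      if x ∈ pvGenericArgs then
        match PySem.List.pyGet? cur ((n + 1 : Nat) : Int) with
        | none => none                    -- ValueError("option %s has no value")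
        | some _ =>
          pvLoopA n (cur.take n ++ cur.drop (n + 2)) (acc ++ (cur.drop n).take 2)
      else pvLoopA n cur acc

def pop_generic_args_py (args : List String) : List String :=
  (pvLoopA args.length args []).getD []   -- getD: raise path, excluded by Pre_

-- ===== PORT B =====
-- B's single pass over reversed(args) with an explicit stack (head = top).
def pvLoopB : List String → List String → List String → Option (List String)
  | [], _, out => some out
  | a :: rest, stack, out =>
    if a ∈ pvGenericArgs then
      match stack with
      | [] => none                        -- ValueError("option %s has no value")
      | v :: s' => pvLoopB rest s' (out ++ [a, v])
    else pvLoopB rest (a :: stack) out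

def pop_generic_args_py_alt (args : List String) : List String :=
  (pvLoopB args.reverse [] []).getD []    -- getD: raise path, excluded by Pre_

-- ===== PRECONDITION & SPEC =====
-- Pre_ excludes exactly the inputs where A raises ValueError (some suffix holds
-- more generic options than other arguments, so a generic option has no value);
-- B raises the identical ValueError there.
def Pre_pop_generic_args_py (args : List String) : Prop :=
  ∀ t ∈ args.tails, 2 * t.countP (· ∈ pvGenericArgs) ≤ t.length

instance (args : List String) : Decidable (Pre_pop_generic_args_py args) := by
  unfold Pre_pop_generic_args_py; infer_instance

def pvWitness_pop_generic_args_py : List String := ["-D", "mapred.reduce.tasks=2", "wc", "in", "out"]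

def Spec_pop_generic_args_py (args : List String) (out : List String) : Prop := out = pop_generic_args_py_alt args
instance (args : List String) (out : List String) : Decidable (Spec_pop_generic_args_py args out) := by unfold Spec_pop_generic_args_py; infer_instance

-- ===== CLAIM (what is proved, stated in full; the proofs are below) =====
def Claim_equal_pop_generic_args_py : Prop := ∀ (args : List String), Dom_pop_generic_args_py args → Pre_pop_generic_args_py args → Spec_pop_generic_args_py args (pop_generic_args_py args)

-- ===== LEMMAS AND PROOFS =====

-- A's state after the scanned prefix `pre` (untouched) with surviving suffix
-- `stack` equals B's state scanning `pre` right-to-left with that stack.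
lemma pvLoopA_eq_loopB (r : List String) : ∀ (stack out : List String),
    pvLoopA r.length (r ++ stack) out = pvLoopB r.reverse stack out := by
  induction r using List.reverseRecOn with
  | nil => intro stack out; simp [pvLoopA, pvLoopB]
  | append_singleton r' a ih =>
    intro stack out
    have hlen : (r' ++ [a]).length = r'.length + 1 := by simp
    have hget : PySem.List.pyGet? ((r' ++ [a]) ++ stack) ((r'.length : Nat) : Int)
        = some a := by
      rw [PySem.List.pyGet?_natCast, List.append_assoc,
        List.getElem?_append_right (by simp)]
      simp
    rw [hlen]
    simp only [pvLoopA, hget]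
    by_cases hg : a ∈ pvGenericArgs
    · simp only [if_pos hg]
      cases stack with
      | nil =>
        have hnone : PySem.List.pyGet? ((r' ++ [a]) ++ ([] : List String))
            ((r'.length + 1 : Nat) : Int) = none := by
          rw [PySem.List.pyGet?_natCast]
          simp
        simp only [hnone]
        simp [pvLoopB, hg]
      | cons v s' =>
        have hsome : PySem.List.pyGet? ((r' ++ [a]) ++ (v :: s'))
            ((r'.length + 1 : Nat) : Int) = some v := by
          rw [PySem.List.pyGet?_natCast, List.append_assoc,
            List.getElem?_append_right (by simp)]
          simp
        simp only [hsome]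
        have htake : ((r' ++ [a]) ++ (v :: s')).take r'.length = r' := by
          rw [List.append_assoc, List.take_append_of_le_length (by simp)]
          simp
        have hdrop2 : ((r' ++ [a]) ++ (v :: s')).drop (r'.length + 2) = s' := by
          have h : (r' ++ [a]) ++ (v :: s') = (r' ++ [a, v]) ++ s' := by simp
          have h2 : r'.length + 2 = (r' ++ [a, v]).length := by simp
          rw [h, h2, List.drop_left]
        have hdrop : (((r' ++ [a]) ++ (v :: s')).drop r'.length).take 2 = [a, v] := by
          rw [List.append_assoc, List.drop_append_of_le_length (by simp)]
          simp
        rw [htake, hdrop2, hdrop, ih s' (out ++ [a, v])]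
        simp [pvLoopB, hg]
    · simp only [if_neg hg]
      have : (r' ++ [a]) ++ stack = r' ++ (a :: stack) := by simp
      rw [this, ih (a :: stack) out]
      simp [pvLoopB, hg]

lemma pv_ports_eq (args : List String) :
    pop_generic_args_py args = pop_generic_args_py_alt args := by
  unfold pop_generic_args_py pop_generic_args_py_alt
  have := pvLoopA_eq_loopB args [] []
  simp only [List.append_nil] at this
  rw [this]

-- ===== VERDICT (by name: the statement is the Claim_ definition above) =====
theorem pop_generic_args_py_spec : Claim_equal_pop_generic_args_py := by
  intro args _ _
  unfold Spec_pop_generic_args_py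
  exact pv_ports_eq args
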